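-- pv_equiv track=rewrite | github.com/minyoungcho99/Programming-Basics | Python/final.py | songMystery
-- ===== SOURCE A (Python) =====
-- def songMystery(codedSong, songNames):
--     codedList = []
--     songList = []
--     song = ""
--     for char in codedSong.lower():
--         codedList.append(char)
--         codedList.sort()
--     for s in songNames:
--         for char in s.lower():
--             songList.append(char)
--             songList.sort()
--         if songList == codedList:
--             song = s.lower()
--             break
--         else:
--             songList = []
--     if song == "":
--         return "I need more clues :("
--     else:
--         return song
-- ===== SOURCE B (Python) =====
-- def songMystery(codedSong, songNames):
--     target = {}
--     for ch in codedSong.lower():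
--         target[ch] = target.get(ch, 0) + 1
--     for s in songNames:
--         name = s.lower()
--         counts = {}
--         for ch in name:
--             counts[ch] = counts.get(ch, 0) + 1
--         if counts == target:
--             return name
--     return "I need more clues :("
-- ===== Notes on version B (the rewrite author's own statement) =====
-- stated objective: faster
-- what changed: Replaces A's repeated append-and-sort of character lists (re-sorting after every single character and comparing sorted lists) with one character-frequency dictionary per string compared to a frequency table of the coded song built once, returning at the first match.
-- intended difference: When codedSong is the empty string and songNames contains the empty string, the match is the empty name, which A's empty-string sentinel mistakes for 'no match found' so A returns 'I need more clues :(' while B returns the matched name '', the intended value. — e.g. on songMystery("", ["a", ""]): A returns "I need more clues :(", B returns ""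
import Mathlib
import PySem

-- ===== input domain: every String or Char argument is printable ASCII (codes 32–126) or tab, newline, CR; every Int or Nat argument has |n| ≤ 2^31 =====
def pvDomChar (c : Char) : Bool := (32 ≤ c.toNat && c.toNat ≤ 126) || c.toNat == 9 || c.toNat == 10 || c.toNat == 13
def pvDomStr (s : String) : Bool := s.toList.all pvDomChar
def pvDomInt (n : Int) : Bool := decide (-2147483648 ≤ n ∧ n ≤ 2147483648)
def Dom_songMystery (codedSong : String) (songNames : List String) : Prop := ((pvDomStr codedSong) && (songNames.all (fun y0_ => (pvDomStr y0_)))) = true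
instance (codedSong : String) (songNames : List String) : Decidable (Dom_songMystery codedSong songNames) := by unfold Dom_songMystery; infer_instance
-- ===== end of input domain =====

-- B replaces A's per-character append-and-re-sort comparison of sorted lists by a character-frequency
-- table of the coded song built once and compared per candidate (objective: faster).


-- ===== PORT A =====
-- 'for char in …: append; sort()' — append one char then a full stable sort, each iteration
def pvSortStep (acc : List Char) (ch : Char) : List Char :=
  PySem.List.sorted (acc ++ [ch]) (fun x => x) false

-- the 'for s in songNames' loop: returns the value of 'song' after the loop ("" if never set)
def pvLoopA (codedList : List Char) : List String → String
  | [] => ""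
  | s :: rest =>
    let songList := (PySem.Str.lower s).toList.foldl pvSortStep []
    if songList = codedList then PySem.Str.lower s else pvLoopA codedList rest

def songMystery (codedSong : String) (songNames : List String) : String :=
  let codedList := (PySem.Str.lower codedSong).toList.foldl pvSortStep []
  let song := pvLoopA codedList songNames
  if song = "" then "I need more clues :(" else song

-- ===== PORT B =====
-- target[ch] = target.get(ch, 0) + 1
def pvCounterOf (cs : List Char) : PySem.Dict Char Int :=
  cs.foldl (fun d ch => d.insert ch (d.getD ch 0 + 1)) PySem.Dict.empty

-- Python's 'counts == target' on dicts ignores insertion order: same key set, same value at each key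
def pvDictEq (d e : PySem.Dict Char Int) : Bool :=
  PySem.Set.equal d.keys e.keys && d.keys.all (fun k => d.getD k 0 == e.getD k 0)

def pvLoopB (target : PySem.Dict Char Int) : List String → String
  | [] => "I need more clues :("
  | s :: rest =>
    let name := PySem.Str.lower s
    if pvDictEq (pvCounterOf name.toList) target then name else pvLoopB target rest

def songMystery_alt (codedSong : String) (songNames : List String) : String :=
  pvLoopB (pvCounterOf (PySem.Str.lower codedSong).toList) songNames

-- ===== PRECONDITION & SPEC =====
-- When codedSong is "" and "" ∈ songNames, the match is the empty name; A's "" sentinel mistakes it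
-- for 'no match' and returns "I need more clues :(", while B returns the matched name "", the intended value.
def D_songMystery (codedSong : String) (songNames : List String) : Prop :=
  codedSong = "" ∧ "" ∈ songNames
instance (codedSong : String) (songNames : List String) : Decidable (D_songMystery codedSong songNames) := by unfold D_songMystery; infer_instance

def Spec_songMystery (codedSong : String) (songNames : List String) (out : String) : Prop :=
  ¬ D_songMystery codedSong songNames → out = songMystery_alt codedSong songNames
instance (codedSong : String) (songNames : List String) (out : String) : Decidable (Spec_songMystery codedSong songNames out) := by unfold Spec_songMystery; infer_instance

def pvDiffWitness_songMystery : String × List String := ("", ["a", ""])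
def pvDiffWitnessOut_songMystery : String × String := ("I need more clues :(", "")

-- ===== CLAIM (what is proved, stated in full; the proofs are below) =====
def Claim_unchanged_songMystery : Prop := ∀ (codedSong : String) (songNames : List String), Dom_songMystery codedSong songNames → Spec_songMystery codedSong songNames (songMystery codedSong songNames)
def Claim_changed_songMystery : Prop := Dom_songMystery (pvDiffWitness_songMystery.1) (pvDiffWitness_songMystery.2) ∧ D_songMystery (pvDiffWitness_songMystery.1) (pvDiffWitness_songMystery.2) ∧ songMystery (pvDiffWitness_songMystery.1) (pvDiffWitness_songMystery.2) = pvDiffWitnessOut_songMystery.1 ∧ songMystery_alt (pvDiffWitness_songMystery.1) (pvDiffWitness_songMystery.2) = pvDiffWitnessOut_songMystery.2 ∧ pvDiffWitnessOut_songMystery.1 ≠ pvDiffWitnessOut_songMystery.2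
def Claim_exact_songMystery : Prop := ∀ (codedSong : String) (songNames : List String), Dom_songMystery codedSong songNames → D_songMystery codedSong songNames → songMystery codedSong songNames ≠ songMystery_alt codedSong songNames

-- ===== LEMMAS AND PROOFS =====

theorem pvStr_eq_nil {t : String} (h : t.toList = []) : t = "" := by
  have := congrArg String.ofList h
  rwa [String.ofList_toList] at this

-- A's append-then-sort loop computes sorted(m ++ l) when started from sorted(m)
theorem pvSortFold (l m : List Char) :
    l.foldl pvSortStep (PySem.List.sorted m (fun x => x) false)
      = PySem.List.sorted (m ++ l) (fun x => x) false := by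
  induction l generalizing m with
  | nil => simp
  | cons ch t ih =>
    have hstep : pvSortStep (PySem.List.sorted m (fun x => x) false) ch
        = PySem.List.sorted (m ++ [ch]) (fun x => x) false := by
      unfold pvSortStep
      exact PySem.List.sorted_eq_sorted_of_perm _ _ _ (fun _ _ h => h)
        ((PySem.List.sorted_perm m (fun x => x) false).append_right [ch])
    simp only [List.foldl_cons, hstep, ih (m ++ [ch]), List.append_assoc, List.singleton_append]

theorem pvSortFold_nil (l : List Char) :
    l.foldl pvSortStep [] = PySem.List.sorted l (fun x => x) false := by
  have := pvSortFold l []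
  simpa using this

-- B's counter loop is Counter(cs)
theorem pvCounterOf_eq (cs : List Char) : pvCounterOf cs = PySem.Dict.counter cs :=
  PySem.Dict.foldl_insert_getD_add_one_eq_counter cs

-- Python dict equality of the two counters is exactly multiset equality of the strings
theorem pvDictEq_counter_iff (l m : List Char) :
    pvDictEq (pvCounterOf l) (pvCounterOf m) = true ↔ l.Perm m := by
  rw [pvCounterOf_eq, pvCounterOf_eq]
  unfold pvDictEq
  rw [Bool.and_eq_true, PySem.Set.equal_iff, List.all_eq_true]
  constructor
  · rintro ⟨hkeys, hvals⟩
    rw [List.perm_iff_count]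
    intro c
    by_cases hc : c ∈ l
    · have hck : c ∈ (PySem.Dict.counter l).keys := by
        rw [PySem.Dict.keys_counter]; exact (PySem.Set.mem_ofList _ _).2 hc
      have := hvals c hck
      simpa [PySem.Dict.getD_counter] using this
    · have hcm : c ∉ m := by
        intro hm
        apply hc
        have hmemm : c ∈ (PySem.Dict.counter m).keys := by
          rw [PySem.Dict.keys_counter]
          exact (PySem.Set.mem_ofList _ _).2 hm
        have hl := (hkeys c).2 hmemm
        rw [PySem.Dict.keys_counter] at hl
        exact (PySem.Set.mem_ofList _ _).1 hl
      simp [List.count_eq_zero_of_not_mem, hc, hcm]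
  · intro hp
    have hcount : ∀ c, l.count c = m.count c := fun c => hp.count_eq c
    have hmem : ∀ c : Char, c ∈ l ↔ c ∈ m := fun c => hp.mem_iff
    constructor
    · intro c
      rw [PySem.Dict.keys_counter, PySem.Dict.keys_counter, PySem.Set.mem_ofList, PySem.Set.mem_ofList]
      exact hmem c
    · intro c _
      simp [PySem.Dict.getD_counter, hcount c]

-- the match tests agree: sorted-list equality vs counter equality
theorem pvMatch_iff (l m : List Char) :
    (l.foldl pvSortStep [] = m.foldl pvSortStep []) ↔ pvDictEq (pvCounterOf l) (pvCounterOf m) = true := by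
  rw [pvSortFold_nil, pvSortFold_nil, PySem.List.sorted_id_eq_sorted_id_iff_perm, pvDictEq_counter_iff]

theorem pvLower_eq_empty_iff (s : String) : PySem.Str.lower s = "" ↔ s = "" := by
  constructor
  · intro h
    have h' : (PySem.Str.lower s).toList = [] := by rw [h]; rfl
    rw [PySem.Str.toList_lower] at h'
    apply pvStr_eq_nil
    cases hs : s.toList with
    | nil => rfl
    | cons a t => rw [hs] at h'; simp [PySem.Chars.lower] at h' 
  · intro h; rw [h]; rfl

theorem pvLoop_agree (coded : List Char) (names : List String)
    (hD : ¬ (coded = [] ∧ "" ∈ names)) :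
    pvLoopB (pvCounterOf coded) names
      = (if pvLoopA (coded.foldl pvSortStep []) names = "" then "I need more clues :("
         else pvLoopA (coded.foldl pvSortStep []) names) := by
  induction names with
  | nil => simp [pvLoopA, pvLoopB]
  | cons s rest ih =>
    simp only [pvLoopA, pvLoopB]
    by_cases hmatch : (PySem.Str.lower s).toList.foldl pvSortStep [] = coded.foldl pvSortStep []
    · have hb : pvDictEq (pvCounterOf (PySem.Str.lower s).toList) (pvCounterOf coded) = true :=
        (pvMatch_iff _ _).1 hmatch
      rw [if_pos hmatch, if_pos hb]
      have hperm : (PySem.Str.lower s).toList.Perm coded :=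
        (pvDictEq_counter_iff _ _).1 hb
      have hne : PySem.Str.lower s ≠ "" := by
        intro h0
        have hs0 : s = "" := (pvLower_eq_empty_iff s).1 h0
        have : coded = [] := by
          have := hperm.symm
          rw [h0] at this
          simpa using this.eq_nil
        exact hD ⟨this, by rw [← hs0]; exact List.mem_cons_self ..⟩
      rw [if_neg hne]
    · have hb : ¬ pvDictEq (pvCounterOf (PySem.Str.lower s).toList) (pvCounterOf coded) = true := by
        intro h; exact hmatch ((pvMatch_iff _ _).2 h)
      rw [if_neg hmatch, if_neg hb]
      apply ih
      intro ⟨hc, hm⟩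
      apply hD
      refine ⟨hc, List.mem_cons_of_mem _ hm⟩

-- ===== VERDICT (by name: the statement is the Claim_ definition above) =====
theorem songMystery_spec : Claim_unchanged_songMystery := by
  intro codedSong songNames _ hD
  unfold songMystery songMystery_alt
  have hD' : ¬ ((PySem.Str.lower codedSong).toList = [] ∧ "" ∈ songNames) := by
    intro ⟨hc, hm⟩
    apply hD
    refine ⟨?_, hm⟩
    exact (pvLower_eq_empty_iff codedSong).1 (pvStr_eq_nil hc)
  simpa using (pvLoop_agree (PySem.Str.lower codedSong).toList songNames hD').symm

theorem songMystery_changed : Claim_changed_songMystery := by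
  unfold Claim_changed_songMystery; decide

theorem pvLoopA_nil_coded (names : List String) : pvLoopA ([].foldl pvSortStep []) names = "" := by
  induction names with
  | nil => simp [pvLoopA]
  | cons s rest ih =>
    simp only [pvLoopA]
    by_cases h : (PySem.Str.lower s).toList.foldl pvSortStep [] = ([] : List Char).foldl pvSortStep []
    · rw [if_pos h]
      rw [pvSortFold_nil, pvSortFold_nil] at h
      simp only [PySem.List.sorted_id_eq_sorted_id_iff_perm] at h
      exact pvStr_eq_nil h.eq_nil
    · rw [if_neg h]; exact ih

theorem pvLoopB_nil_coded (names : List String) (hm : "" ∈ names) :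
    pvLoopB (pvCounterOf []) names = "" := by
  induction names with
  | nil => cases hm
  | cons s rest ih =>
    simp only [pvLoopB]
    by_cases h : pvDictEq (pvCounterOf (PySem.Str.lower s).toList) (pvCounterOf []) = true
    · rw [if_pos h]
      have hperm := (pvDictEq_counter_iff _ _).1 h
      exact pvStr_eq_nil hperm.eq_nil
    · rw [if_neg h]
      rcases List.mem_cons.1 hm with h0 | h0
      · exfalso
        apply h
        rw [← h0]
        exact (pvDictEq_counter_iff _ _).2 (by simp [PySem.Str.lower, PySem.Chars.lower])
      · exact ih h0

theorem songMystery_tight : Claim_exact_songMystery := by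
  intro codedSong songNames _ hD
  obtain ⟨hc, hm⟩ := hD
  subst hc
  have hA : songMystery "" songNames = "I need more clues :(" := by
    unfold songMystery
    simpa using congrArg (fun r => if r = "" then "I need more clues :(" else r)
      (pvLoopA_nil_coded songNames)
  have hB : songMystery_alt "" songNames = "" := by
    unfold songMystery_alt
    exact pvLoopB_nil_coded songNames hm
  rw [hA, hB]; decide
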